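-- pv_equiv track=rewrite | github.com/looloolalaa/Python-Challenge | PRO_조이스틱.py | solution
-- ===== SOURCE A (Python) =====
-- def solution(name):
--     move = 0
--
--     have_to_go = []
--     for i, c in enumerate(name):
--         if c != 'A':
--             have_to_go.append(i)
--             front = ord(c) - ord('A')
--             rear = ord('Z') - ord(c) + 1
--             move += min(front, rear)
--
--     def get_min_dis():
--         if not have_to_go:
--             return 0
--         elif len(have_to_go) == 1:
--             return min(have_to_go[0], len(name)-have_to_go[0])
--
--         min_dis = have_to_go[-1]
--         for i in range(len(have_to_go)-1):
--             front, rear = have_to_go[i], len(name) - have_to_go[i+1]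
--             new_dis = min(2*front+rear, 2*rear+front)
--             min_dis = min(min_dis, new_dis)
--         return min_dis
--
--     return move + get_min_dis()
-- ===== SOURCE B (Python) =====
-- def solution(name):
--     # Canonical single-pass joystick solution: one backward sweep, no index list,
--     # tracking nxt = nearest non-'A' position to the right.
--     n = len(name)
--     if n == 0:
--         return 0
--     vert = 0
--     best = n - 1
--     nxt = n
--     for i in range(n - 1, -1, -1):
--         o = ord(name[i])
--         vert += min(o - 65, 91 - o)
--         best = min(best, 2 * i + (n - nxt), 2 * (n - nxt) + i)
--         if name[i] != 'A':
--             nxt = i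
--     return vert + best
-- ===== Notes on version B (the rewrite author's own statement) =====
-- stated objective: alternative
-- what changed: Replaces A's two-phase index-list + adjacent-pair scan (which never considers turning left before reaching the first non-'A' letter) by the canonical single backward pass that tries every turning point, tracking the nearest needed position to the right.
-- intended difference: On names with at least two non-'A' letters where going left first past the leading 'A'-run is strictly cheapest (e.g. 'AABB'), A returns an overcount (5 for 'AABB') because its pair enumeration omits that strategy, while B returns the true minimum number of joystick moves (4), which is the intended value of this well-known puzzle. — e.g. on solution("AABB"): A returns 5, B returns 4
import Mathlib
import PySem

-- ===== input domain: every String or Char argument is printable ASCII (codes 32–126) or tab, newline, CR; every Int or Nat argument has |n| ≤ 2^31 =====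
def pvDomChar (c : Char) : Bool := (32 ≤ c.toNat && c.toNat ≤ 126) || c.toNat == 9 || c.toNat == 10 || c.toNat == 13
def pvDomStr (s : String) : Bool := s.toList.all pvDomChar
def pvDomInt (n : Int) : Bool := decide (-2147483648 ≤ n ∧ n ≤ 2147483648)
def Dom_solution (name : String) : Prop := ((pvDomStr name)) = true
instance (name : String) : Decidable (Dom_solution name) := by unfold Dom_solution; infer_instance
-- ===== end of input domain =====

-- B replaces A's two-phase index-list + adjacent-pair scan by the canonical single
-- backward pass over the string; on names where turning left first is strictly cheapest
-- A overcounts and B returns the intended minimum (see D_solution below).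

-- ===== PORT A =====
def solution (name : String) : Int :=
  let st := (PySem.List.enumerate name.toList 0).foldl
      (fun (st : Int × List Int) ic =>
        if ic.2 ≠ 'A' then
          (st.1 + min ((ic.2.toNat : Int) - 65) (90 - (ic.2.toNat : Int) + 1), st.2 ++ [ic.1])
        else st) (0, [])
  let have_to_go := st.2
  let n : Int := PySem.Str.len name
  let min_dis : Int :=
    if have_to_go = [] then 0
    else if have_to_go.length = 1 then
      min (PySem.List.pyGetD have_to_go 0 0) (n - PySem.List.pyGetD have_to_go 0 0)
    else
      (PySem.List.pyRange 0 ((have_to_go.length : Int) - 1) 1).foldl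
        (fun md i =>
          min md (min (2 * PySem.List.pyGetD have_to_go i 0 + (n - PySem.List.pyGetD have_to_go (i + 1) 0))
                      (2 * (n - PySem.List.pyGetD have_to_go (i + 1) 0) + PySem.List.pyGetD have_to_go i 0)))
        (PySem.List.pyGetD have_to_go (-1) 0)
  st.1 + min_dis

-- ===== PORT B =====
def solution_alt (name : String) : Int :=
  let n : Int := PySem.Str.len name
  if n = 0 then 0
  else
    let s := name.toList
    let st := (PySem.List.pyRange (n - 1) (-1) (-1)).foldl
      (fun (st : Int × Int × Int) i =>
        (st.1 + min (((PySem.List.pyGetD s i 'A').toNat : Int) - 65) (91 - ((PySem.List.pyGetD s i 'A').toNat : Int)),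
         min st.2.1 (min (2 * i + (n - st.2.2)) (2 * (n - st.2.2) + i)),
         if PySem.List.pyGetD s i 'A' ≠ 'A' then i else st.2.2)) (0, n - 1, n)
    st.1 + st.2.1

-- ===== PRECONDITION & SPEC =====
-- On names with ≥ 2 non-'A' letters (P = their positions, n = the length) where reversing
-- direction before the first non-'A' letter (cost n - P.headI) strictly beats every
-- candidate A tries (finish at the last non-'A' letter, or double back between two
-- consecutive non-'A' letters), A returns an overcount while B returns the true minimum
-- number of joystick moves, the intended value.
def D_solution (name : String) : Prop :=
  let P := (name.toList.zipIdx.filter (·.1 != 'A')).map (fun p => (p.2 : Int))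
  let n : Int := name.toList.length
  2 ≤ P.length ∧ n - P.headI < P.getLastD 0 ∧
  ∀ x ∈ P.zip P.tail, n - P.headI < min (2 * x.1 + (n - x.2)) (2 * (n - x.2) + x.1)
instance (name : String) : Decidable (D_solution name) := by unfold D_solution; infer_instance

def Spec_solution (name : String) (out : Int) : Prop := ¬ D_solution name → out = solution_alt name
instance (name : String) (out : Int) : Decidable (Spec_solution name out) := by unfold Spec_solution; infer_instance

def pvDiffWitness_solution : String := "AABB"
def pvDiffWitnessOut_solution : Int × Int := (5, 4)

-- ===== CLAIM (what is proved, stated in full; the proofs are below) =====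
def Claim_unchanged_solution : Prop := ∀ (name : String), Dom_solution name → Spec_solution name (solution name)
def Claim_changed_solution : Prop := Dom_solution (pvDiffWitness_solution) ∧ D_solution (pvDiffWitness_solution) ∧ solution (pvDiffWitness_solution) = pvDiffWitnessOut_solution.1 ∧ solution_alt (pvDiffWitness_solution) = pvDiffWitnessOut_solution.2 ∧ pvDiffWitnessOut_solution.1 ≠ pvDiffWitnessOut_solution.2
def Claim_exact_solution : Prop := ∀ (name : String), Dom_solution name → D_solution name → solution name ≠ solution_alt name

-- ===== LEMMAS AND PROOFS =====

-- proof-side helpers: positions list in accumulator form, pair cost, running pair minimum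
def canonPos : List Char → Int → List Int
  | [], _ => []
  | c :: t, s => if c ≠ 'A' then s :: canonPos t (s + 1) else canonPos t (s + 1)

def pvPair (N p q : Int) : Int := min (2 * p + (N - q)) (2 * (N - q) + p)

def pvPM (N : Int) : Int → List Int → Int → Int
  | _, [], acc => acc
  | p, b :: t, acc => pvPM N b t (min acc (pvPair N p b))

-- A's change condition in running-minimum form, used to organise the proofs
def pvDb (N : Int) (P : List Int) : Bool :=
  match P with
  | p :: q :: t => decide (N - p < min ((q :: t).getLastD p) (pvPM N q t (pvPair N p q)))
  | _ => false


-- spec-level value of one letter (A's form)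
def aV : List Char → Int
  | [] => 0
  | c :: t => (if c ≠ 'A' then min ((c.toNat : Int) - 65) (90 - (c.toNat : Int) + 1) else 0) + aV t

-- B's per-letter vertical cost (summed over the reversed traversal)
def sumV : List Char → Int
  | [] => 0
  | c :: t => min ((c.toNat : Int) - 65) (91 - (c.toNat : Int)) + sumV t

-- B's loop, re-expressed structurally over the reversed character list: the element at the
-- head of `r` is the character at absolute position r.tail.length.
def loopRev (N : Int) : List Char → (Int × Int × Int) → Int × Int × Int
  | [], st => st
  | c :: r, st =>
      loopRev N r
        (st.1 + min ((c.toNat : Int) - 65) (91 - (c.toNat : Int)),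
         min st.2.1 (min (2 * (r.length : Int) + (N - st.2.2)) (2 * (N - st.2.2) + (r.length : Int))),
         if c ≠ 'A' then (r.length : Int) else st.2.2)

def bestF (N : Int) : List Char → Int → Int → Int
  | [], _, b => b
  | c :: r, nx, b =>
      bestF N r (if c ≠ 'A' then (r.length : Int) else nx) (min b (pvPair N (r.length : Int) nx))

def nxtF : List Char → Int → Int
  | [], nx => nx
  | c :: r, nx => nxtF r (if c ≠ 'A' then (r.length : Int) else nx)

-- ascending non-'A' positions of the reversed list
def QQ : List Char → List Int
  | [] => []
  | c :: r => if c ≠ 'A' then QQ r ++ [(r.length : Int)] else QQ r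

def GG (N : Int) : List Int → Int
  | [] => 0
  | q :: t => pvPM N q t (N - q)

-- A's get_min_dis, on the positions list
def AH (N : Int) (P : List Int) : Int :=
  match P with
  | [] => 0
  | [p] => min p (N - p)
  | p :: q :: t => pvPM N p (q :: t) ((q :: t).getLastD p)

-- ---------- generic min/pm lemmas ----------
lemma pvPair_mono {N p p' q : Int} (h : p ≤ p') : pvPair N p q ≤ pvPair N p' q := by
  simp only [pvPair, min_def]; split_ifs <;> omega

lemma pm_acc (N : Int) : ∀ (t : List Int) (p a c : Int),
    pvPM N p t (min a c) = min a (pvPM N p t c) := by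
  intro t
  induction t with
  | nil => intro p a c; simp [pvPM]
  | cons b t ih =>
      intro p a c
      simp only [pvPM, min_assoc]
      exact ih b a (min c (pvPair N p b))

lemma pm_pure (N : Int) (p b : Int) (t : List Int) (acc : Int) :
    pvPM N p (b :: t) acc = min acc (pvPM N b t (pvPair N p b)) := by
  simp only [pvPM]
  have := pm_acc N t b acc (pvPair N p b)
  simpa using this

lemma pm_append (N : Int) : ∀ (t : List Int) (p acc x : Int),
    pvPM N p (t ++ [x]) acc = min (pvPM N p t acc) (pvPair N (t.getLastD p) x) := by
  intro t
  induction t with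
  | nil => intro p acc x; simp [pvPM]
  | cons b t ih =>
      intro p acc x
      simp only [List.cons_append, pvPM, List.getLastD_cons]
      exact ih b (min acc (pvPair N p b)) x

lemma getLastD_mem : ∀ (t : List Int) (p : Int), t.getLastD p ∈ p :: t := by
  intro t
  induction t with
  | nil => intro p; simp [List.getLastD]
  | cons b t ih =>
      intro p
      rw [List.getLastD_cons]
      exact List.mem_cons_of_mem p (ih b)

-- ---------- A-side reductions ----------
lemma afold_eq : ∀ (l : List Char) (s m : Int) (h : List Int),
    (PySem.List.enumerate l s).foldl
      (fun (st : Int × List Int) ic =>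
        if ic.2 ≠ 'A' then
          (st.1 + min ((ic.2.toNat : Int) - 65) (90 - (ic.2.toNat : Int) + 1), st.2 ++ [ic.1])
        else st) (m, h)
    = (m + aV l, h ++ canonPos l s) := by
  intro l
  induction l with
  | nil => intro s m h; simp [PySem.List.enumerate_nil, aV, canonPos]
  | cons c t ih =>
      intro s m h
      rw [PySem.List.enumerate_cons]
      simp only [List.foldl_cons]
      by_cases hc : c = 'A'
      · subst hc
        rw [if_neg (by simp)]
        rw [ih]
        simp [aV, canonPos]
      · rw [if_pos (by simpa using hc)]
        rw [ih]
        simp [aV, canonPos, hc, add_assoc]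

lemma canon_append : ∀ (l t : List Char) (s : Int),
    canonPos (l ++ t) s = canonPos l s ++ canonPos t (s + l.length) := by
  intro l
  induction l with
  | nil => intro t s; simp [canonPos]
  | cons c l ih =>
      intro t s
      have hlen : (s + 1) + (l.length : Int) = s + ((c :: l).length : Int) := by
        simp [List.length_cons]; ring
      simp only [List.cons_append, canonPos]
      by_cases hc : c = 'A'
      · subst hc
        rw [if_neg (by simp), if_neg (by simp), ih, hlen]
      · rw [if_pos (by simpa using hc), if_pos (by simpa using hc), ih, hlen]
        simp

lemma canon_mem : ∀ (l : List Char) (s x : Int), x ∈ canonPos l s → s ≤ x ∧ x < s + l.length := by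
  intro l
  induction l with
  | nil => intro s x hx; simp [canonPos] at hx
  | cons c t ih =>
      intro s x hx
      rw [canonPos] at hx
      by_cases hc : c = 'A'
      · subst hc
        rw [if_neg (by simp)] at hx
        have := ih (s + 1) x hx
        simp only [List.length_cons] at *
        push_cast at *
        omega
      · rw [if_pos (by simpa using hc)] at hx
        rcases List.mem_cons.1 hx with h | h
        · subst h; simp only [List.length_cons]; push_cast; omega
        · have := ih (s + 1) x h
          simp only [List.length_cons] at *
          push_cast at *
          omega

-- the pair loop of get_min_dis, as a structural fold (stated on List.range)
lemma pairs_range (N : Int) : ∀ (t : List Int) (p q acc : Int),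
    (List.range (t.length + 1)).foldl
      (fun md k =>
        min md (min (2 * (p :: q :: t).getD k 0 + (N - (p :: q :: t).getD (k + 1) 0))
                    (2 * (N - (p :: q :: t).getD (k + 1) 0) + (p :: q :: t).getD k 0))) acc
    = pvPM N p (q :: t) acc := by
  intro t
  induction t with
  | nil =>
      intro p q acc
      simp [pvPM, pvPair, List.range_succ, List.getD]
  | cons b t ih =>
      intro p q acc
      rw [List.range_succ_eq_map]
      simp only [List.foldl_cons, List.foldl_map]
      have h0 : (p :: q :: b :: t).getD 0 0 = p := rfl
      have h1 : (p :: q :: b :: t).getD (0 + 1) 0 = q := rfl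
      rw [h0, h1]
      have hext := List.foldl_ext
        (fun (x : Int) (y : Nat) =>
          min x (min (2 * (p :: q :: b :: t).getD y.succ 0 + (N - (p :: q :: b :: t).getD (y.succ + 1) 0))
                     (2 * (N - (p :: q :: b :: t).getD (y.succ + 1) 0) + (p :: q :: b :: t).getD y.succ 0)))
        (fun (x : Int) (y : Nat) =>
          min x (min (2 * (q :: b :: t).getD y 0 + (N - (q :: b :: t).getD (y + 1) 0))
                     (2 * (N - (q :: b :: t).getD (y + 1) 0) + (q :: b :: t).getD y 0)))
        (min acc (pvPair N p q))
        (l := List.range ((b :: t).length))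
        (by intro a x _; simp [Nat.succ_eq_add_one])
      rw [show min (2 * p + (N - q)) (2 * (N - q) + p) = pvPair N p q from rfl, hext]
      have : (b :: t).length = t.length + 1 := by simp
      rw [this]
      rw [ih q b (min acc (pvPair N p q))]
      simp [pvPM, pvPair]

-- ---------- B-side reductions ----------
lemma bfold_eq (N : Int) : ∀ (l : List Char) (st : Int × Int × Int),
    (PySem.List.pyRange ((l.length : Int) - 1) (-1) (-1)).foldl
      (fun (st : Int × Int × Int) i =>
        (st.1 + min (((PySem.List.pyGetD l i 'A').toNat : Int) - 65) (91 - ((PySem.List.pyGetD l i 'A').toNat : Int)),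
         min st.2.1 (min (2 * i + (N - st.2.2)) (2 * (N - st.2.2) + i)),
         if PySem.List.pyGetD l i 'A' ≠ 'A' then i else st.2.2)) st
    = loopRev N l.reverse st := by
  intro l
  induction l using List.reverseRecOn with
  | nil =>
      intro st
      rw [show ((List.length ([] : List Char) : Int) - 1) = -1 by simp]
      rw [PySem.List.pyRange_neg_one_eq_nil (by omega)]
      simp [loopRev]
  | append_singleton l c ih =>
      intro st
      rw [show ((l ++ [c]).length : Int) - 1 = (l.length : Int) by simp]
      rw [PySem.List.pyRange_neg_one_cons (by omega)]
      rw [List.foldl_cons]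
      have hgetc : PySem.List.pyGetD (l ++ [c]) (l.length : Int) 'A' = c := by
        rw [PySem.List.pyGetD_eq_getElem _ _ (by omega) (by simp)]
        simp
      have hfold : ∀ st' : Int × Int × Int,
          (PySem.List.pyRange ((l.length : Int) - 1) (-1) (-1)).foldl
            (fun (st : Int × Int × Int) i =>
              (st.1 + min (((PySem.List.pyGetD (l ++ [c]) i 'A').toNat : Int) - 65)
                          (91 - ((PySem.List.pyGetD (l ++ [c]) i 'A').toNat : Int)),
               min st.2.1 (min (2 * i + (N - st.2.2)) (2 * (N - st.2.2) + i)),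
               if PySem.List.pyGetD (l ++ [c]) i 'A' ≠ 'A' then i else st.2.2)) st'
          = (PySem.List.pyRange ((l.length : Int) - 1) (-1) (-1)).foldl
            (fun (st : Int × Int × Int) i =>
              (st.1 + min (((PySem.List.pyGetD l i 'A').toNat : Int) - 65)
                          (91 - ((PySem.List.pyGetD l i 'A').toNat : Int)),
               min st.2.1 (min (2 * i + (N - st.2.2)) (2 * (N - st.2.2) + i)),
               if PySem.List.pyGetD l i 'A' ≠ 'A' then i else st.2.2)) st' := by
        intro st'
        apply List.foldl_ext
        intro a i hi
        have hb := (PySem.List.mem_pyRange_neg_one).1 hi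
        have hget : PySem.List.pyGetD (l ++ [c]) i 'A' = PySem.List.pyGetD l i 'A' := by
          rw [PySem.List.pyGetD_eq_getElem _ _ (by omega) (by simp; omega),
              PySem.List.pyGetD_eq_getElem _ _ (by omega) (by omega)]
          rw [List.getElem_append_left]
        simp only [hget]
      rw [hfold, ih]
      rw [List.reverse_append, List.reverse_singleton, List.singleton_append]
      simp only [loopRev, hgetc, List.length_reverse]

lemma loopRev_eq (N : Int) : ∀ (r : List Char) (st : Int × Int × Int),
    loopRev N r st = (st.1 + sumV r, bestF N r st.2.2 st.2.1, nxtF r st.2.2) := by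
  intro r
  induction r with
  | nil => intro st; simp [loopRev, sumV, bestF, nxtF]
  | cons c r ih =>
      intro st
      simp only [loopRev, bestF, nxtF, sumV, pvPair]
      rw [ih]
      simp [add_assoc]

lemma QQ_lt : ∀ (r : List Char) (x : Int), x ∈ QQ r → 0 ≤ x ∧ x < (r.length : Int) := by
  intro r
  induction r with
  | nil => intro x hx; simp [QQ] at hx
  | cons c r ih =>
      intro x hx
      rw [QQ] at hx
      by_cases hc : c = 'A'
      · subst hc
        rw [if_neg (by simp)] at hx
        have := ih x hx
        simp only [List.length_cons]; push_cast; omega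
      · rw [if_pos (by simpa using hc)] at hx
        rcases List.mem_append.1 hx with h | h
        · have := ih x h
          simp only [List.length_cons]; push_cast; omega
        · simp at h; subst h
          simp only [List.length_cons]; push_cast; omega

lemma bestF_eq (N : Int) : ∀ (r : List Char) (nx b : Int), r ≠ [] →
    (r.length : Int) ≤ nx → nx ≤ N →
    bestF N r nx b = min b (GG N (QQ r ++ [nx])) := by
  intro r
  induction r with
  | nil => intro nx b h; exact absurd rfl h
  | cons c r ih =>
      intro nx b _ hle hN
      have hk : (r.length : Int) + 1 ≤ nx := by
        simpa [List.length_cons] using hle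
      simp only [bestF]
      rcases List.eq_nil_or_concat r with hr | ⟨r₀, c₀, hr⟩
      · -- single character: the recursive call is on []
        subst hr
        simp only [bestF, QQ, List.length_nil, Nat.cast_zero]
        by_cases hc : c = 'A'
        · subst hc
          simp only [ne_eq, not_true_eq_false, if_false, List.nil_append, GG, pvPM]
          congr 1
          simp only [pvPair, min_def]; split_ifs <;> omega
        · rw [if_pos (by simpa using hc)]
          simp only [List.nil_append, List.cons_append, GG, pvPM]
          congr 1
          simp only [pvPair, min_def]; split_ifs <;> omega
      · have hrne : r ≠ [] := by subst hr; simp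
        have hle' : (r.length : Int) ≤ (if c ≠ 'A' then (r.length : Int) else nx) := by
          split_ifs <;> omega
        have hN' : (if c ≠ 'A' then (r.length : Int) else nx) ≤ N := by
          split_ifs <;> omega
        rw [ih _ _ hrne hle' hN']
        rw [min_assoc]
        congr 1
        -- min (pvPair N k nx) (GG N (QQ r ++ [nx'])) = GG N (QQ (c::r) ++ [nx])
        by_cases hc : c = 'A'
        · subst hc
          simp only [QQ]
          simp only [ne_eq, not_true_eq_false, if_false] at hle' hN' ⊢
          rcases hq : QQ r with _ | ⟨q0, t⟩
          · simp only [List.nil_append]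
            simp only [GG, pvPM]
            simp only [pvPair, min_def]; split_ifs <;> omega
          · simp only [List.cons_append, GG]
            rw [pm_append]
            have hmem : t.getLastD q0 ∈ QQ r := by rw [hq]; exact getLastD_mem t q0
            have hlt := QQ_lt r _ hmem
            have hmono : pvPair N (t.getLastD q0) nx ≤ pvPair N (r.length : Int) nx :=
              pvPair_mono (by omega)
            set A1 := pvPair N (r.length : Int) nx with hA1
            set B1 := pvPair N (t.getLastD q0) nx with hB1
            set X1 := pvPM N q0 t (N - q0) with hX1
            simp only [min_def]; split_ifs <;> omega
        · simp only [QQ]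
          simp only [ne_eq, hc, not_false_eq_true, if_true] at hle' hN' ⊢
          rcases hq : QQ r with _ | ⟨q0, t⟩
          · simp only [List.nil_append, List.singleton_append]
            simp only [GG, pvPM]
            simp only [pvPair, min_def]; split_ifs <;> omega
          · simp only [List.cons_append, List.append_assoc, GG]
            rw [show t ++ (r.length : Int) :: ([] ++ [nx]) = (t ++ [(r.length : Int)]) ++ [nx] by simp]
            rw [pm_append, pm_append, pm_append]
            have hlast : (t ++ [(r.length : Int)]).getLastD q0 = (r.length : Int) := by
              rw [List.getLastD_eq_getLast?, List.getLast?_concat]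
              rfl
            rw [hlast]
            set A1 := pvPair N (r.length : Int) nx with hA1
            set X1 := pvPM N q0 t (N - q0) with hX1
            set B1 := pvPair N (t.getLastD q0) (r.length : Int) with hB1
            simp only [min_def]; split_ifs <;> omega

lemma aV_append : ∀ (a b : List Char), aV (a ++ b) = aV a + aV b := by
  intro a
  induction a with
  | nil => intro b; simp [aV]
  | cons c t ih => intro b; simp [aV, ih]; ring

lemma QQ_reverse : ∀ (l : List Char), QQ l.reverse = canonPos l 0 := by
  intro l
  induction l using List.reverseRecOn with
  | nil => simp [QQ, canonPos]
  | append_singleton l c ih =>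
      rw [canon_append l [c] 0, List.reverse_append, List.reverse_singleton, List.singleton_append]
      rw [QQ]
      by_cases hc : c = 'A'
      · subst hc
        rw [if_neg (by simp)]
        simp [canonPos, ih]
      · rw [if_pos (by simpa using hc)]
        simp [canonPos, hc, ih]

lemma vchar_eq (c : Char) :
    min ((c.toNat : Int) - 65) (91 - (c.toNat : Int))
      = (if c ≠ 'A' then min ((c.toNat : Int) - 65) (90 - (c.toNat : Int) + 1) else 0) := by
  by_cases hc : c = 'A'
  · subst hc
    rw [if_neg (by simp)]
    decide
  · rw [if_pos (by simpa using hc)]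
    congr 1
    ring

lemma sumV_reverse : ∀ (l : List Char), sumV l.reverse = aV l := by
  intro l
  induction l using List.reverseRecOn with
  | nil => simp [sumV, aV]
  | append_singleton l c ih =>
      rw [List.reverse_append, List.reverse_singleton, List.singleton_append]
      rw [sumV, aV_append, ih, vchar_eq]
      simp [aV]
      ring

-- ---------- assembly ----------
lemma pyGetD_last (p q : Int) (t : List Int) :
    PySem.List.pyGetD (p :: q :: t) (-1) 0 = (q :: t).getLastD p := by
  rw [PySem.List.pyGetD_neg_one _ _ (by simp)]
  rw [List.getLastD_eq_getLast?, List.getLast?_eq_some_getLast (l := q :: t) (by simp)]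
  simp [List.getLast_cons]

lemma solA_eq (name : String) :
    solution name = aV name.toList + AH (name.toList.length : Int) (canonPos name.toList 0) := by
  simp only [solution, PySem.Str.len_eq]
  rw [afold_eq name.toList 0 0 []]
  simp only [List.nil_append, zero_add]
  rcases hP : canonPos name.toList 0 with _ | ⟨p, _ | ⟨q, t⟩⟩
  · simp [AH]
  · simp [AH, PySem.List.pyGetD_zero_cons]
  · rw [if_neg (by simp), if_neg (by simp)]
    rw [pyGetD_last]
    congr 1
    rw [show (((p :: q :: t).length : Nat) : Int) - 1 = ((t.length + 1 : Nat) : Int) by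
          push_cast [List.length_cons]; ring]
    rw [PySem.List.pyRange_one]
    rw [show ((((t.length + 1 : Nat) : Int)) - 0).toNat = t.length + 1 by simp]
    rw [List.foldl_map]
    have hext := List.foldl_ext
      (fun (md : Int) (k : Nat) =>
        min md (min (2 * PySem.List.pyGetD (p :: q :: t) ((0 : Int) + (k : Int)) 0
                        + ((name.toList.length : Int) - PySem.List.pyGetD (p :: q :: t) ((0 : Int) + (k : Int) + 1) 0))
                    (2 * ((name.toList.length : Int) - PySem.List.pyGetD (p :: q :: t) ((0 : Int) + (k : Int) + 1) 0)
                        + PySem.List.pyGetD (p :: q :: t) ((0 : Int) + (k : Int)) 0)))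
      (fun (md : Int) (k : Nat) =>
        min md (min (2 * (p :: q :: t).getD k 0 + ((name.toList.length : Int) - (p :: q :: t).getD (k + 1) 0))
                    (2 * ((name.toList.length : Int) - (p :: q :: t).getD (k + 1) 0) + (p :: q :: t).getD k 0)))
      ((q :: t).getLastD p)
      (l := List.range (t.length + 1))
      (by
        intro a k _
        have h1 : ((0 : Int) + (k : Int)) = ((k : Nat) : Int) := by ring
        have h2 : ((k : Int) + 1) = (((k + 1 : Nat)) : Int) := by push_cast; ring
        simp only [h1, h2, PySem.List.pyGetD_natCast])
    rw [hext, pairs_range, AH]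

lemma solB_eq (name : String) (h : name.toList ≠ []) :
    solution_alt name = aV name.toList
      + min ((name.toList.length : Int) - 1)
            (GG (name.toList.length : Int) (canonPos name.toList 0 ++ [(name.toList.length : Int)])) := by
  have hlen : name.toList.length ≠ 0 := by simpa [List.length_eq_zero_iff] using h
  simp only [solution_alt, PySem.Str.len_eq]
  rw [if_neg (by exact_mod_cast hlen)]
  rw [bfold_eq]
  rw [loopRev_eq]
  rw [bestF_eq _ _ _ _ (by simpa using h) (by simp) (le_refl _)]
  rw [QQ_reverse, sumV_reverse]
  simp

-- final arithmetic: compare the two horizontal minima outside/inside the change region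
lemma key (N : Int) (P : List Int) (hb : ∀ x ∈ P, 0 ≤ x ∧ x < N) (hN : 1 ≤ N) :
    (pvDb N P = false → min (N - 1) (GG N (P ++ [N])) = AH N P) ∧
    (pvDb N P = true → min (N - 1) (GG N (P ++ [N])) < AH N P) := by
  rcases P with _ | ⟨p, _ | ⟨q, t⟩⟩
  · refine ⟨fun _ => ?_, fun hcon => by simp [pvDb] at hcon⟩
    simp only [List.nil_append, GG, pvPM, AH]
    simp only [min_def]; split_ifs <;> omega
  · have hp := hb p (by simp)
    refine ⟨fun _ => ?_, fun hcon => by simp [pvDb] at hcon⟩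
    simp only [List.singleton_append, GG, AH, pvPM, pvPair]
    simp only [min_def]; split_ifs <;> omega
  · have hp := hb p (by simp)
    have hLmem : t.getLastD q ∈ p :: q :: t := List.mem_cons_of_mem p (getLastD_mem t q)
    have hL := hb _ hLmem
    have hGG : GG N ((p :: q :: t) ++ [N])
        = min (N - p) (min (pvPM N q t (pvPair N p q)) (pvPair N (t.getLastD q) N)) := by
      simp only [List.cons_append, GG]
      rw [show t ++ [N] = t ++ [N] from rfl]
      rw [pm_pure, pm_append]
    have hAH : AH N (p :: q :: t) = min (t.getLastD q) (pvPM N q t (pvPair N p q)) := by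
      rw [AH, List.getLastD_cons, pm_pure]
    have hpairL : pvPair N (t.getLastD q) N = t.getLastD q := by
      simp only [pvPair, min_def]; split_ifs <;> omega
    rw [hGG, hAH, hpairL]
    constructor
    · intro hfalse
      simp only [pvDb, List.getLastD_cons, decide_eq_false_iff_not] at hfalse
      set S := pvPM N q t (pvPair N p q) with hS
      set L := t.getLastD q with hLd
      simp only [min_def] at hfalse ⊢
      split_ifs at hfalse ⊢ <;> omega
    · intro htrue
      simp only [pvDb, List.getLastD_cons, decide_eq_true_eq] at htrue
      set S := pvPM N q t (pvPair N p q) with hS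
      set L := t.getLastD q with hLd
      simp only [min_def] at htrue ⊢
      split_ifs at htrue ⊢ <;> omega

-- bridge: the compact change region D_solution equals the running-minimum form pvDb
lemma pvP_eq_aux : ∀ (l : List Char) (k : Nat),
    ((l.zipIdx k).filter (·.1 != 'A')).map (fun p => (p.2 : Int)) = canonPos l (k : Int) := by
  intro l
  induction l with
  | nil => intro k; simp [canonPos]
  | cons c t ih =>
      intro k
      rw [List.zipIdx_cons]
      by_cases hc : c = 'A'
      · subst hc
        rw [canonPos, if_neg (by simp)]
        rw [List.filter_cons_of_neg (by simp)]
        rw [show ((k : Int) + 1) = ((k + 1 : Nat) : Int) by push_cast; ring]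
        exact ih (k + 1)
      · rw [canonPos, if_pos (by simpa using hc)]
        rw [List.filter_cons_of_pos (by simpa using hc)]
        rw [List.map_cons]
        rw [show ((k : Int) + 1) = ((k + 1 : Nat) : Int) by push_cast; ring]
        rw [ih (k + 1)]

lemma pvP_eq (name : String) :
    (name.toList.zipIdx.filter (·.1 != 'A')).map (fun p => (p.2 : Int))
      = canonPos name.toList 0 := by
  simpa using pvP_eq_aux name.toList 0

lemma pm_lt_iff (N : Int) : ∀ (u : List Int) (p a acc : Int),
    (a < pvPM N p u acc) ↔ (a < acc ∧ ∀ x ∈ (p :: u).zip u, a < pvPair N x.1 x.2) := by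
  intro u
  induction u with
  | nil => intro p a acc; simp [pvPM]
  | cons b u ih =>
      intro p a acc
      rw [show pvPM N p (b :: u) acc = pvPM N b u (min acc (pvPair N p b)) from rfl]
      rw [ih b a (min acc (pvPair N p b))]
      simp only [List.zip_cons_cons, List.mem_cons, lt_min_iff]
      constructor
      · rintro ⟨⟨h1, h2⟩, h3⟩
        refine ⟨h1, fun x hx => ?_⟩
        rcases hx with rfl | hx
        · exact h2
        · exact h3 x hx
      · rintro ⟨h1, h2⟩
        exact ⟨⟨h1, h2 _ (Or.inl rfl)⟩, fun x hx => h2 x (Or.inr hx)⟩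

lemma D_iff (name : String) :
    D_solution name ↔ pvDb (name.toList.length : Int) (canonPos name.toList 0) = true := by
  unfold D_solution
  simp only [pvP_eq]
  rcases hP : canonPos name.toList 0 with _ | ⟨p, _ | ⟨q, t⟩⟩
  · simp [pvDb]
  · simp [pvDb]
  · simp only [pvDb, decide_eq_true_eq, List.headI_cons, List.tail_cons,
      List.getLastD_cons, List.length_cons]
    rw [show min (t.getLastD q) (pvPM (name.toList.length : Int) q t
          (pvPair (name.toList.length : Int) p q))
        = pvPM (name.toList.length : Int) p (q :: t) (t.getLastD q) from
      (pm_pure (name.toList.length : Int) p q t (t.getLastD q)).symm]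
    rw [pm_lt_iff]
    simp only [pvPair]
    constructor
    · rintro ⟨_, h1, h2⟩
      exact ⟨h1, h2⟩
    · rintro ⟨h1, h2⟩
      exact ⟨by omega, h1, h2⟩

-- ===== VERDICT =====
theorem solution_spec : Claim_unchanged_solution := by
  unfold Claim_unchanged_solution
  intro name _
  unfold Spec_solution
  intro hnD
  by_cases hl : name.toList = []
  · rw [solA_eq]
    simp [solution_alt, hl, aV, canonPos, AH]
  · have hb : ∀ x ∈ canonPos name.toList 0, 0 ≤ x ∧ x < (name.toList.length : Int) := by
      intro x hx
      have := canon_mem name.toList 0 x hx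
      omega
    have hN : 1 ≤ (name.toList.length : Int) := by
      have : name.toList.length ≠ 0 := by simpa [List.length_eq_zero_iff] using hl
      omega
    have hD : pvDb (name.toList.length : Int) (canonPos name.toList 0) = false := by
      rcases hB : pvDb (name.toList.length : Int) (canonPos name.toList 0) with _ | _
      · rfl
      · exact absurd ((D_iff name).mpr hB) hnD
    rw [solA_eq, solB_eq name hl, (key _ _ hb hN).1 hD]

theorem solution_changed : Claim_changed_solution := by
  unfold Claim_changed_solution; decide

theorem solution_tight : Claim_exact_solution := by
  unfold Claim_exact_solution
  intro name _ hD0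
  have hD := (D_iff name).mp hD0
  have hl : name.toList ≠ [] := by
    intro hnil
    rw [hnil] at hD
    simp [canonPos, pvDb] at hD
  have hb : ∀ x ∈ canonPos name.toList 0, 0 ≤ x ∧ x < (name.toList.length : Int) := by
    intro x hx
    have := canon_mem name.toList 0 x hx
    omega
  have hN : 1 ≤ (name.toList.length : Int) := by
    have : name.toList.length ≠ 0 := by simpa [List.length_eq_zero_iff] using hl
    omega
  have hlt := (key _ _ hb hN).2 hD
  rw [solA_eq, solB_eq name hl]
  omega
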